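-- pv_equiv track=rewrite | github.com/edsokolo/thinkful | projects/pirate_bartender/pirate_bartender.py | name_drink
-- ===== SOURCE A (Python) =====
-- def name_drink(answers):
--     name = ''
--     count = 0
--     for answer in answers:
--         if answers[answer] == True and count < 1:
--             name += (answer + " n' ")
--             count += 1
--         elif answers[answer] == True and count < 2:
--             name += (answer + " ")
--             count += 1
--     return (name + "Dog")
-- ===== SOURCE B (Python) =====
-- def name_drink(answers):
--     def after_first(pairs):
--         # looking for the second true key; string is built on return
--         if not pairs:
--             return "Dog"
--         k, v = pairs[0]
--         if v == True:
--             return k + " Dog"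
--         return after_first(pairs[1:])
--
--     def before_first(pairs):
--         # looking for the first true key
--         if not pairs:
--             return "Dog"
--         k, v = pairs[0]
--         if v == True:
--             return k + " n' " + after_first(pairs[1:])
--         return before_first(pairs[1:])
--
--     return before_first(list(answers.items()))
-- ===== Notes on version B (the rewrite author's own statement) =====
-- stated objective: alternative
-- what changed: B replaces A's imperative accumulate-and-count loop with two phased recursive functions that build the name back-to-front on return (Dog at the base cases), iterating the items' own values instead of re-looking each key up in the dict; no counter, no string accumulator.
import Mathlib
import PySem

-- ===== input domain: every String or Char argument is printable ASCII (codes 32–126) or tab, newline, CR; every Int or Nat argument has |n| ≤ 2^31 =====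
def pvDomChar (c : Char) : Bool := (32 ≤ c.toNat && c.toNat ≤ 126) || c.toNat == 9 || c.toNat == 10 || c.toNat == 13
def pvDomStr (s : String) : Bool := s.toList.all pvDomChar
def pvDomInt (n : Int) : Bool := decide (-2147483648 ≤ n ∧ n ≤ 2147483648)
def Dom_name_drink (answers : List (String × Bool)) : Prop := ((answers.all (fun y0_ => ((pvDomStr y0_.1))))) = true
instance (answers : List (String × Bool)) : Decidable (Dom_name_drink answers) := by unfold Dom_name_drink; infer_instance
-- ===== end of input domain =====

-- B replaces A's accumulate-and-count loop with two phased recursive functions building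
-- the name back-to-front ("Dog" at the base cases), reading each pair's own value
-- instead of re-looking the key up (objective: alternative decomposition, same cost).

-- ===== PORT A =====
-- answers[answer]: first-match lookup in the association list (the dict)
def pyDictGet (answers : List (String × Bool)) (k : String) : Bool :=
  match answers with
  | [] => false
  | (k', v) :: rest => if k' == k then v else pyDictGet rest k

def name_drink (answers : List (String × Bool)) : String :=
  let r := answers.foldl (fun (st : String × Int) p =>
    if pyDictGet answers p.1 == true && st.2 < 1 then
      (st.1 ++ (p.1 ++ " n' "), st.2 + 1)
    else if pyDictGet answers p.1 == true && st.2 < 2 then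
      (st.1 ++ (p.1 ++ " "), st.2 + 1)
    else st) ("", 0)
  r.1 ++ "Dog"

-- ===== PORT B =====
-- after_first: looking for the second true key
def after_first (pairs : List (String × Bool)) : String :=
  match pairs with
  | [] => "Dog"
  | (k, v) :: rest => if v == true then k ++ " Dog" else after_first rest

-- before_first: looking for the first true key
def before_first (pairs : List (String × Bool)) : String :=
  match pairs with
  | [] => "Dog"
  | (k, v) :: rest =>
      if v == true then k ++ " n' " ++ after_first rest else before_first rest

def name_drink_alt (answers : List (String × Bool)) : String :=
  before_first answers

-- ===== PRECONDITION & SPEC =====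
-- Pre_ requires distinct keys: the Python argument is a dict, whose keys are necessarily distinct.
def Pre_name_drink (answers : List (String × Bool)) : Prop := (answers.map Prod.fst).Nodup
instance (answers : List (String × Bool)) : Decidable (Pre_name_drink answers) := by unfold Pre_name_drink; infer_instance
def pvWitness_name_drink : (List (String × Bool)) := [("Sour", true), ("Bitter", true), ("Salty", true)]
def Spec_name_drink (answers : List (String × Bool)) (out : String) : Prop := out = name_drink_alt answers
instance (answers : List (String × Bool)) (out : String) : Decidable (Spec_name_drink answers out) := by unfold Spec_name_drink; infer_instance

-- ===== CLAIM (what is proved, stated in full; the proofs are below) =====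
def Claim_equal_name_drink : Prop := ∀ (answers : List (String × Bool)), Dom_name_drink answers → Pre_name_drink answers → Spec_name_drink answers (name_drink answers)

-- ===== LEMMAS AND PROOFS =====

-- with nodup keys, the dict lookup of a key of the list returns that pair's value
theorem pyDictGet_mem (answers : List (String × Bool))
    (h : (answers.map Prod.fst).Nodup) {p : String × Bool} (hp : p ∈ answers) :
    pyDictGet answers p.1 = p.2 := by
  induction answers with
  | nil => cases hp
  | cons q rest ih =>
    simp only [List.map_cons, List.nodup_cons] at h
    rcases List.mem_cons.1 hp with rfl | hp'
    · simp [pyDictGet]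
    · simp only [pyDictGet]
      have hne : q.1 ≠ p.1 := fun he => h.1 (he ▸ List.mem_map_of_mem hp')
      rw [if_neg (by simp only [beq_iff_eq]; exact hne)]
      exact ih h.2 hp'

-- the plain fold over the pairs' own values
def stepv (st : String × Int) (p : String × Bool) : String × Int :=
  if p.2 == true && st.2 < 1 then (st.1 ++ (p.1 ++ " n' "), st.2 + 1)
  else if p.2 == true && st.2 < 2 then (st.1 ++ (p.1 ++ " "), st.2 + 1)
  else st

theorem fold_c2 (l : List (String × Bool)) (s : String) (c : Int) (hc : 2 ≤ c) :
    l.foldl stepv (s, c) = (s, c) := by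
  induction l with
  | nil => rfl
  | cons p rest ih =>
    simp only [List.foldl_cons, stepv]
    rw [if_neg (by simp; omega), if_neg (by simp; omega)]
    exact ih

-- once the first true key is consumed, the fold's string is s extended by B's after_first
-- minus the final "Dog"
theorem fold_c1_after (l : List (String × Bool)) (s : String) :
    (l.foldl stepv (s, 1)).1 ++ "Dog" = s ++ after_first l := by
  induction l generalizing s with
  | nil => simp [after_first]
  | cons p rest ih =>
    simp only [List.foldl_cons, stepv, after_first]
    by_cases hv : p.2
    · rw [if_neg (by simp [hv]), if_pos (by simp [hv])]
      rw [show (1:Int)+1 = 2 from rfl, fold_c2 _ _ _ le_rfl]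
      simp [hv, String.append_assoc]
    · rw [if_neg (by simp [hv]), if_neg (by simp [hv])]
      simp [hv, ih]

theorem fold_c0_before (l : List (String × Bool)) (s : String) :
    (l.foldl stepv (s, 0)).1 ++ "Dog" = s ++ before_first l := by
  induction l generalizing s with
  | nil => simp [before_first]
  | cons p rest ih =>
    simp only [List.foldl_cons, stepv, before_first]
    by_cases hv : p.2
    · rw [if_pos (by simp [hv])]
      rw [show (0:Int)+1 = 1 from rfl, fold_c1_after]
      simp [hv, String.append_assoc]
    · rw [if_neg (by simp [hv]), if_neg (by simp [hv])]
      simp [hv, ih]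

-- ===== VERDICT (by name: the statement is the Claim_ definition above) =====
theorem name_drink_spec : Claim_equal_name_drink := by
  intro answers _ hpre
  unfold Spec_name_drink name_drink name_drink_alt
  have hcg : answers.foldl (fun (st : String × Int) p =>
      if pyDictGet answers p.1 == true && st.2 < 1 then
        (st.1 ++ (p.1 ++ " n' "), st.2 + 1)
      else if pyDictGet answers p.1 == true && st.2 < 2 then
        (st.1 ++ (p.1 ++ " "), st.2 + 1)
      else st) ("", 0) = answers.foldl stepv ("", 0) := by
    apply PySem.List.foldl_congr_mem
    intro acc x hx
    simp [stepv, pyDictGet_mem answers hpre hx]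
  rw [hcg]
  have := fold_c0_before answers ""
  simpa using this
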